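-- pv_equiv track=rewrite | github.com/U-Kyung13/Data-structure-and-Algorithms-Study | Programmers/practice/0505_이진변환반복하기.py | solution
-- ===== SOURCE A (Python) =====
-- def solution(s):
--     convert_cnt = 0
--     remove_cnt = 0
--
--     while s != "1":
--         if '0' in s:
--             remove_cnt += s.count('0')
--             s = s.replace('0', '')
--
--         length = len(s)
--
--         s = str(bin(len(s)))[2:]
--         convert_cnt += 1
--
--     answer = [convert_cnt, remove_cnt]
--     return answer
-- ===== SOURCE B (Python) =====
-- def solution(s):
--     # Materialise the popcount trajectory as a list, then derive both answers by
--     # aggregate sums over it (telescoped: removed zeros = sum of bit-lengths minus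
--     # sum of successors), instead of per-iteration accumulators on a rebuilt string.
--     if s == "1":
--         return [0, 0]
--     zeros = s.count('0')
--     chain = [len(s) - zeros]
--     while chain[-1] != 1:
--         chain.append(chain[-1].bit_count())
--     return [len(chain),
--             zeros + sum(v.bit_length() for v in chain[:-1]) - sum(chain[1:])]
-- ===== Notes on version B (the rewrite author's own statement) =====
-- stated objective: alternative
-- what changed: A loops on a string it rebuilds every round (count '0', replace, bin(len)) with running accumulators; B reads the string once, materialises the whole popcount trajectory as a list, and computes both answers afterwards by aggregate sums over that list (removed zeros telescoped as sum of bit-lengths minus sum of successors).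
import Mathlib
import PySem

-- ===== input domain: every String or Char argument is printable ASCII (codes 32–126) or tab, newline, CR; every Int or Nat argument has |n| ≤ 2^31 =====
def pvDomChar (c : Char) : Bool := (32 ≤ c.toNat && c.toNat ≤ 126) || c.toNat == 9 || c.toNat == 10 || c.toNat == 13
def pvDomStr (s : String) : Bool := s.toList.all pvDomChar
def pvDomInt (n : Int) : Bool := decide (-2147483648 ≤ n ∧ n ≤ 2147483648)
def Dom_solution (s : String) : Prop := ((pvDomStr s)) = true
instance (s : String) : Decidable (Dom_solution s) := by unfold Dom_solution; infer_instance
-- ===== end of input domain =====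

-- B replaces A's per-round string rebuilding with in-loop accumulators by one initial scan,
-- a materialised popcount-trajectory list, and aggregate sums over that list (alternative).

-- ===== PORT A =====
-- the while-loop of A; fuel only makes it total (the loop runs at most (number of non-'0' chars) times)
def solLoop : Nat → List Char → Int → Int → List Int
  | 0, _, c, r => [c, r]
  | fuel+1, cs, c, r =>
    if cs = ['1'] then [c, r]
    else
      let st :=
        if PySem.Chars.isIn ['0'] cs then
          (r + (PySem.Chars.count cs ['0'] : Int), PySem.Chars.replace cs ['0'] [])
        else (r, cs)
      let length : Int := PySem.Chars.len st.2
      -- s = str(bin(length))[2:]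
      let cs2 := PySem.List.slice (PySem.Int.toBinChars0b length) (some 2) none
      solLoop fuel cs2 (c + 1) st.1

def solution (s : String) : List Int :=
  solLoop (s.toList.length + 1) s.toList 0 0

-- ===== PORT B =====
-- the chain-building while-loop of B (append popcount of the last element until it is 1),
-- written as the structural recursion producing the same list; fuel only makes it total
def chainFrom : Nat → Int → List Int
  | 0, n => [n]
  | fuel+1, n => if n = 1 then [n] else n :: chainFrom fuel (PySem.Int.bitCount n)

def solution_alt (s : String) : List Int :=
  let cs := s.toList
  if cs = ['1'] then [0, 0]
  else
    let zeros : Int := (PySem.Chars.count cs ['0'] : Int)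
    let chain := chainFrom cs.length (PySem.Chars.len cs - zeros)
    [(chain.length : Int),
     zeros + (chain.dropLast.map (fun v => (PySem.Int.bitLength v : Int))).sum
           - (chain.drop 1).sum]

-- ===== PRECONDITION & SPEC =====
-- Pre_ excludes exactly the strings with no character other than '0' (empty or all-'0'), on which
-- the Python A (and B) loops forever and returns nothing.
def Pre_solution (s : String) : Prop := (s.toList.any (fun c => c ≠ '0')) = true
instance (s : String) : Decidable (Pre_solution s) := by unfold Pre_solution; infer_instance
def pvWitness_solution : String := "110"

def Spec_solution (s : String) (out : List Int) : Prop := out = solution_alt s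
instance (s : String) (out : List Int) : Decidable (Spec_solution s out) := by unfold Spec_solution; infer_instance

-- ===== CLAIM (what is proved, stated in full; the proofs are below) =====
def Claim_equal_solution : Prop := ∀ (s : String), Dom_solution s → Pre_solution s → Spec_solution s (solution s)

-- ===== LEMMAS AND PROOFS =====

-- big-endian binary digits of n ('' for 0); the string A's loop carries from iteration 2 on
def natBin : Nat → List Char
  | 0 => []
  | n+1 => natBin ((n+1)/2) ++ [if (n+1) % 2 = 1 then '1' else '0']

theorem natBin_pos (n : Nat) (h : 1 ≤ n) :
    natBin n = natBin (n/2) ++ [if n % 2 = 1 then '1' else '0'] := by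
  obtain ⟨m, rfl⟩ := Nat.exists_eq_add_of_le h
  simp [natBin, Nat.add_comm]

-- Nat.toDigits 2 (the [2:] tail of bin(n)) is natBin for positive n
theorem toDigitsCore_eq (n : Nat) : ∀ fuel acc, 1 ≤ n → n ≤ fuel →
    Nat.toDigitsCore 2 (fuel+1) n acc = natBin n ++ acc := by
  induction n using Nat.strong_induction_on with
  | _ n ih =>
    intro fuel acc h1 hf
    rw [Nat.toDigitsCore]
    by_cases h2 : n / 2 = 0
    · have hn1 : n = 1 := by omega
      subst hn1
      simp [natBin, Nat.digitChar]
    · have hn2 : 2 ≤ n := by omega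
      obtain ⟨f, rfl⟩ : ∃ f, fuel = f + 1 := ⟨fuel - 1, by omega⟩
      simp only [h2, if_neg h2]
      rw [ih (n/2) (by omega) f (Nat.digitChar (n % 2) :: acc) (by omega) (by omega)]
      rw [natBin_pos n h1]
      rcases Nat.mod_two_eq_zero_or_one n with h | h <;> simp [h, Nat.digitChar]

theorem toDigits_eq (n : Nat) (h : 1 ≤ n) : Nat.toDigits 2 n = natBin n := by
  have := toDigitsCore_eq n n [] h le_rfl
  simpa [Nat.toDigits] using this

theorem natBin_length (n : Nat) : (natBin n).length = PySem.Int.bitLength (n : Int) := by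
  induction n using Nat.strong_induction_on with
  | _ n ih =>
    rcases Nat.eq_zero_or_pos n with h | h
    · subst h; simp [natBin]
    · rw [natBin_pos n h, PySem.Int.bitLength_natCast h]
      simp [ih (n/2) (by omega)]

theorem natBin_count_one (n : Nat) : (natBin n).count '1' = PySem.Int.bitCount (n : Int) := by
  induction n using Nat.strong_induction_on with
  | _ n ih =>
    rcases Nat.eq_zero_or_pos n with h | h
    · subst h; simp [natBin]
    · have hih := ih (n/2) (by omega)
      rw [natBin_pos n h, PySem.Int.bitCount_natCast h, List.count_append]
      rcases Nat.mod_two_eq_zero_or_one n with h2 | h2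
      · rw [h2, if_neg (by decide)]
        have hc : List.count '1' ['0'] = 0 := by decide
        omega
      · rw [h2, if_pos rfl]
        have hc : List.count '1' ['1'] = 1 := by decide
        omega

theorem natBin_count_zero (n : Nat) :
    (natBin n).count '0' + PySem.Int.bitCount (n : Int) = PySem.Int.bitLength (n : Int) := by
  induction n using Nat.strong_induction_on with
  | _ n ih =>
    rcases Nat.eq_zero_or_pos n with h | h
    · subst h; simp [natBin]
    · have hih := ih (n/2) (by omega)
      rw [natBin_pos n h, PySem.Int.bitCount_natCast h, PySem.Int.bitLength_natCast h,
          List.count_append]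
      rcases Nat.mod_two_eq_zero_or_one n with h2 | h2
      · rw [h2, if_neg (by decide)]
        have hc : List.count '0' ['0'] = 1 := by decide
        omega
      · rw [h2, if_pos rfl]
        have hc : List.count '0' ['1'] = 0 := by decide
        omega

theorem natBin_mem (n : Nat) : ∀ c ∈ natBin n, c = '0' ∨ c = '1' := by
  induction n using Nat.strong_induction_on with
  | _ n ih =>
    rcases Nat.eq_zero_or_pos n with h | h
    · subst h; simp [natBin]
    · rw [natBin_pos n h]
      intro c hc
      rcases List.mem_append.1 hc with hc | hc
      · exact ih (n/2) (by omega) c hc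
      · rcases Nat.mod_two_eq_zero_or_one n with h2 | h2 <;> simp [h2] at hc <;> simp [hc]

theorem bin_filter_len (l : List Char) (h : ∀ c ∈ l, c = '0' ∨ c = '1') :
    (l.filter (fun c => !decide (c = '0'))).length = l.count '1' := by
  induction l with
  | nil => simp
  | cons a t ih =>
    have ih' := ih (fun c hc => h c (List.mem_cons_of_mem _ hc))
    rcases h a (List.mem_cons_self) with h0 | h1 <;> subst_vars <;>
      simp [List.filter_cons, List.count_cons] <;> omega

-- Chars.count with a single-character needle is List.count
theorem count_go_singleton (a : Char) (l : List Char) : ∀ fuel acc, l.length ≤ fuel →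
    PySem.Chars.count.go [a] fuel l acc = acc + l.count a := by
  induction l with
  | nil => intro fuel acc _; cases fuel <;> simp [PySem.Chars.count.go]
  | cons c t ih =>
    intro fuel acc hf
    obtain ⟨f, rfl⟩ : ∃ f, fuel = f + 1 := ⟨fuel - 1, by simp at hf; omega⟩
    have hlp : ([a].isPrefixOf (c :: t)) = (c == a) := by
      simp [List.isPrefixOf]; exact eq_comm
    rw [PySem.Chars.count.go, hlp]
    by_cases hca : c = a
    · subst hca
      rw [if_pos (by simp), show List.drop [c].length (c :: t) = t from rfl,
        ih f (acc+1) (by simp at hf; omega), List.count_cons_self]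
      omega
    · rw [if_neg (by simp [hca]), ih f acc (by simp at hf; omega)]
      have hca' : ¬ a = c := fun h => hca h.symm
      simp [List.count_cons, hca, hca']

theorem chars_count_singleton (a : Char) (l : List Char) :
    PySem.Chars.count l [a] = l.count a := by
  rw [PySem.Chars.count]
  simp [count_go_singleton a l l.length 0 le_rfl]

-- Chars.replace of a single character by "" is filter
theorem replace_go_singleton (a : Char) (l : List Char) : ∀ fuel acc, l.length ≤ fuel →
    PySem.Chars.replace.go [a] [] fuel l acc =
      acc.reverse ++ l.filter (fun c => !decide (c = a)) := by
  induction l with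
  | nil => intro fuel acc _; cases fuel <;> simp [PySem.Chars.replace.go]
  | cons c t ih =>
    intro fuel acc hf
    obtain ⟨f, rfl⟩ : ∃ f, fuel = f + 1 := ⟨fuel - 1, by simp at hf; omega⟩
    have hlp : ([a].isPrefixOf (c :: t)) = (c == a) := by
      simp [List.isPrefixOf]; exact eq_comm
    rw [PySem.Chars.replace.go, hlp]
    by_cases hca : c = a
    · subst hca
      rw [if_pos (by simp), show List.drop [c].length (c :: t) = t from rfl]
      rw [show (List.reverse ([] : List Char)) ++ acc = acc from rfl,
        ih f acc (by simp at hf; omega)]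
      simp [List.filter_cons]
    · rw [if_neg (by simp [hca]), ih f (c :: acc) (by simp at hf; omega)]
      simp [List.filter_cons, hca]

theorem chars_replace_singleton (a : Char) (l : List Char) :
    PySem.Chars.replace l [a] [] = l.filter (fun c => !decide (c = a)) := by
  rw [PySem.Chars.replace]
  simp [replace_go_singleton a l l.length [] le_rfl]

theorem isIn_false_not_mem (a : Char) (l : List Char)
    (h : PySem.Chars.isIn [a] l = false) : a ∉ l := by
  intro hm
  rw [PySem.Chars.isIn_eq_false_iff] at h
  obtain ⟨pre, suf, rfl⟩ := List.append_of_mem hm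
  exact h ⟨pre, suf, by simp⟩

theorem filter_of_not_mem (a : Char) (l : List Char) (h : a ∉ l) :
    l.filter (fun c => !decide (c = a)) = l := by
  apply List.filter_eq_self.2
  intro c hc
  simp only [Bool.not_eq_eq_eq_not, Bool.not_true, decide_eq_false_iff_not]
  intro hc0; exact h (hc0 ▸ hc)

-- bitCount arithmetic
theorem bitCount_pos (m : Nat) (h : 1 ≤ m) : 1 ≤ PySem.Int.bitCount (m : Int) := by
  induction m using Nat.strong_induction_on with
  | _ m ih =>
    rw [PySem.Int.bitCount_natCast h]
    rcases Nat.lt_or_ge m 2 with h2 | h2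
    · interval_cases m; simp
    · have := ih (m/2) (by omega) (by omega)
      omega

theorem bitCount_le_self (m : Nat) : PySem.Int.bitCount (m : Int) ≤ m := by
  induction m using Nat.strong_induction_on with
  | _ m ih =>
    rcases Nat.eq_zero_or_pos m with h | h
    · subst h; simp
    · rw [PySem.Int.bitCount_natCast h]
      have := ih (m/2) (by omega)
      omega

theorem bitCount_lt_self (m : Nat) (h : 2 ≤ m) : PySem.Int.bitCount (m : Int) < m := by
  rw [PySem.Int.bitCount_natCast (by omega : 0 < m)]
  have := bitCount_le_self (m/2)
  omega

theorem natBin_ne_one (n : Nat) (h : 2 ≤ n) : natBin n ≠ ['1'] := by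
  intro hc
  have hl := natBin_length n
  rw [hc] at hl
  rw [PySem.Int.bitLength_natCast (by omega : 0 < n),
      PySem.Int.bitLength_natCast (by omega : 0 < n/2)] at hl
  simp at hl

-- one A-iteration body on the binary string of n (n ≥ 1): removal merged into one expression
theorem natBin_step (n : Nat) (h : 1 ≤ n) (r : Int) :
    (if PySem.Chars.isIn ['0'] (natBin n) then
        (r + (PySem.Chars.count (natBin n) ['0'] : Int), PySem.Chars.replace (natBin n) ['0'] [])
      else (r, natBin n)) =
    (r + ((PySem.Int.bitLength (n : Int) : Int) - (PySem.Int.bitCount (n : Int) : Int)),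
      (natBin n).filter (fun c => !decide (c = '0'))) := by
  have hcz := natBin_count_zero n
  cases hin : PySem.Chars.isIn ['0'] (natBin n)
  · have hnm := isIn_false_not_mem '0' (natBin n) hin
    have h0 : (natBin n).count '0' = 0 := List.count_eq_zero.2 hnm
    have hfil := filter_of_not_mem '0' (natBin n) hnm
    rw [if_neg (by simp), hfil]
    have hz : (PySem.Int.bitLength (n : Int) : Int) - (PySem.Int.bitCount (n : Int) : Int) = 0 := by
      omega
    rw [hz, add_zero]
  · rw [if_pos rfl, chars_count_singleton, chars_replace_singleton]
    have hz : ((natBin n).count '0' : Int) =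
        (PySem.Int.bitLength (n : Int) : Int) - (PySem.Int.bitCount (n : Int) : Int) := by
      omega
    rw [hz]

-- bin(m)[2:] as a char list, for m ≥ 1
theorem slice_toBin (m : Nat) (h : 1 ≤ m) :
    PySem.List.slice (PySem.Int.toBinChars0b (m : Int)) (some 2) none = natBin m := by
  rw [PySem.Int.toBinChars0b, if_neg (by omega)]
  rw [PySem.List.slice_some_none]
  rw [show ((m : Int)).toNat = m from Int.toNat_natCast m, toDigits_eq m h]
  have hlen : 1 ≤ (natBin m).length := by
    rw [natBin_length, PySem.Int.bitLength_natCast (by omega : 0 < m)]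
    omega
  have hc : PySem.List.clampIdx ('0' :: 'b' :: natBin m).length 2 = 2 := by
    simp [PySem.List.clampIdx]
    try omega
  rw [hc]
  simp

-- the chain always starts with its seed and is never empty
theorem chainFrom_ne_nil (f : Nat) (n : Int) : chainFrom f n ≠ [] := by
  cases f with
  | zero => simp [chainFrom]
  | succ f => by_cases h : n = 1 <;> simp [chainFrom, h]

theorem chainFrom_head (f : Nat) (n : Int) : (chainFrom f n).headI = n := by
  cases f with
  | zero => simp [chainFrom]
  | succ f => by_cases h : n = 1 <;> simp [chainFrom, h]

-- LOCKSTEP: from iteration 2 on, A's string is natBin n while B's chain (seeded at n)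
-- describes exactly the rest of A's run via its length and aggregate sums
theorem lockstep (n : Nat) : 1 ≤ n → ∀ f₁ f₂ (c r : Int), n ≤ f₁ → n ≤ f₂ →
    solLoop f₁ (natBin n) c r =
      [c + ((chainFrom f₂ (n : Int)).length : Int) - 1,
       r + ((chainFrom f₂ (n : Int)).dropLast.map
              (fun v => (PySem.Int.bitLength v : Int))).sum
         - ((chainFrom f₂ (n : Int)).drop 1).sum] := by
  induction n using Nat.strong_induction_on with
  | _ n ih =>
    intro h1 f₁ f₂ c r hf₁ hf₂
    obtain ⟨a, rfl⟩ : ∃ a, f₁ = a + 1 := ⟨f₁ - 1, by omega⟩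
    obtain ⟨b, rfl⟩ : ∃ b, f₂ = b + 1 := ⟨f₂ - 1, by omega⟩
    by_cases hn1 : n = 1
    · subst hn1
      simp [solLoop, chainFrom, natBin]
    · have h2 : 2 ≤ n := by omega
      have hbc1 : 1 ≤ PySem.Int.bitCount (n : Int) := bitCount_pos n h1
      have hbclt : PySem.Int.bitCount (n : Int) < n := bitCount_lt_self n h2
      rw [solLoop, if_neg (natBin_ne_one n h2)]
      simp only [natBin_step n h1 r]
      have hlen : PySem.Chars.len ((natBin n).filter (fun c => !decide (c = '0'))) =
          ((PySem.Int.bitCount (n : Int) : Nat) : Int) := by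
        rw [PySem.Chars.len, bin_filter_len _ (natBin_mem n), natBin_count_one]
      rw [hlen, slice_toBin _ hbc1]
      rw [ih (PySem.Int.bitCount (n : Int)) hbclt hbc1 a b (c+1) _ (by omega) (by omega)]
      -- unfold one step of the chain on the right-hand side
      have hch : chainFrom (b+1) (n : Int) =
          (n : Int) :: chainFrom b ((PySem.Int.bitCount (n : Int) : Nat) : Int) := by
        rw [chainFrom, if_neg (show ¬((n : Int) = 1) from by exact_mod_cast hn1)]
      rw [hch]
      have hne := chainFrom_ne_nil b ((PySem.Int.bitCount (n : Int) : Nat) : Int)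
      obtain ⟨x, t, hxt⟩ := List.exists_cons_of_ne_nil hne
      have hx : x = ((PySem.Int.bitCount (n : Int) : Nat) : Int) := by
        have hh := chainFrom_head b ((PySem.Int.bitCount (n : Int) : Nat) : Int)
        rw [hxt] at hh; simpa using hh
      rw [hxt, hx]
      simp only [List.dropLast_cons₂, List.length_cons, List.drop_succ_cons, List.drop_zero,
        List.map_cons, List.sum_cons, List.cons.injEq, and_true]
      constructor
      · push_cast; ring
      · push_cast; ring

-- count '0' + (chars ≠ '0') = length
theorem count_zero_add_filter (l : List Char) :
    l.count '0' + (l.filter (fun c => !decide (c = '0'))).length = l.length := by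
  induction l with
  | nil => simp
  | cons a t ih =>
    by_cases h : a = '0' <;> simp [List.count_cons, List.filter_cons, h] <;> omega

-- ===== VERDICT (by name: the statement is the Claim_ definition above) =====
theorem solution_spec : Claim_equal_solution := by
  intro s _ hpre
  unfold Spec_solution solution solution_alt
  set cs := s.toList with hcs
  by_cases hone : cs = ['1']
  · rw [hone]
    simp [solLoop, chainFrom]
  · rw [if_neg hone]
    rw [solLoop, if_neg hone]
    have hn0 : 1 ≤ (cs.filter (fun c => !decide (c = '0'))).length := by
      unfold Pre_solution at hpre
      rw [List.any_eq_true] at hpre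
      obtain ⟨x, hx, hx0⟩ := hpre
      have hx0' : ¬ x = '0' := by simpa using hx0
      have : x ∈ cs.filter (fun c => !decide (c = '0')) := by
        rw [List.mem_filter]
        exact ⟨hx, by simpa using hx0'⟩
      exact List.length_pos_of_mem this
    have hstep :
        (if PySem.Chars.isIn ['0'] cs then
            ((0:Int) + (PySem.Chars.count cs ['0'] : Int), PySem.Chars.replace cs ['0'] [])
          else ((0:Int), cs)) =
        ((cs.count '0' : Int), cs.filter (fun c => !decide (c = '0'))) := by
      cases hin : PySem.Chars.isIn ['0'] cs
      · have hnm := isIn_false_not_mem '0' cs hin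
        have h0 : cs.count '0' = 0 := List.count_eq_zero.2 hnm
        rw [if_neg (by simp), filter_of_not_mem '0' cs hnm, h0]
        simp
      · rw [if_pos rfl, chars_count_singleton, chars_replace_singleton]
        simp
    simp only [hstep]
    have hsum := count_zero_add_filter cs
    rw [show PySem.Chars.len (cs.filter (fun c => !decide (c = '0'))) =
        (((cs.filter (fun c => !decide (c = '0'))).length : Nat) : Int) from rfl]
    rw [slice_toBin _ hn0]
    rw [show PySem.Chars.len cs = ((cs.length : Nat) : Int) from rfl, chars_count_singleton]
    rw [show ((cs.length : Nat) : Int) - ((cs.count '0' : Nat) : Int) =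
        (((cs.filter (fun c => !decide (c = '0'))).length : Nat) : Int) from by omega]
    rw [lockstep _ hn0 cs.length cs.length (0 + 1) ((cs.count '0' : Int)) (by omega) (by omega)]
    simp only [List.cons.injEq, and_true]
    omega
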